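-- pv_equiv track=rewrite | github.com/novamkr/web-vitals | website_checker.py | calculate_deductions
-- ===== SOURCE A (Python) =====
-- def calculate_deductions(results):
--     deductions = {}
--
--     # Major
--     exposed_count = len(results.get('exposed_keys', []))
--     broken_404_count = len([b for b in results.get('broken_links', []) if b[1] == "404"])
--     accessibility_count = len(results.get('accessibility', []))
--     keyboard_count = len(results.get('keyboard_accessibility', []))
--     clickable_images_count = len(results.get('clickable_images', []))
--
--     deductions['Exposed API Keys/JWTs Deducted'] = min(exposed_count * 17, 35)
--     deductions['Broken Links Deducted'] = min(broken_404_count * 5, 25)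
--     deductions['508 Accessibility Issues Deducted'] = min(accessibility_count * 10, 20)
--     deductions['Keyboard Accessibility Issues Deducted'] = min(keyboard_count * 10, 20)
--     deductions['Clickable Image Issues Deducted'] = min(clickable_images_count * 5, 10)
--
--     # Minor
--     deductions['Missing ARIA Labels Deducted'] = 5 if results.get('missing_aria') else 0
--     deductions['Missing Alt Text Deducted'] = 5 if results.get('missing_alt') else 0
--     deductions['HTTPS Compliance Issues Deducted'] = 5 if results.get('https') else 0
--     deductions['Outdated HTML Tags Deducted'] = 5 if results.get('outdated_html') else 0
--     deductions['Large Images Deducted'] = 5 if results.get('large_images') else 0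
--     deductions['Color Contrast Issues Deducted'] = 5 if results.get('color_contrast') else 0
--
--     # Design checks
--     deductions['Responsive Viewport Deducted'] = 5 if results.get('responsive_viewport') else 0
--     deductions['Modern Doctype Deducted'] = 5 if results.get('modern_doctype') else 0
--     deductions['Layout Tables Deducted'] = 5 if results.get('layout_tables') else 0
--
--     return deductions
-- ===== SOURCE B (Python) =====
-- MAJOR = {
--     'exposed_keys': (17, 35),
--     'accessibility': (10, 20),
--     'keyboard_accessibility': (10, 20),
--     'clickable_images': (5, 10),
-- }
--
-- MINOR_KEYS = ('missing_aria', 'missing_alt', 'https', 'outdated_html',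
--               'large_images', 'color_contrast', 'responsive_viewport',
--               'modern_doctype', 'layout_tables')
--
-- ORDER = [
--     ('Exposed API Keys/JWTs Deducted', 'exposed_keys'),
--     ('Broken Links Deducted', 'broken_links'),
--     ('508 Accessibility Issues Deducted', 'accessibility'),
--     ('Keyboard Accessibility Issues Deducted', 'keyboard_accessibility'),
--     ('Clickable Image Issues Deducted', 'clickable_images'),
--     ('Missing ARIA Labels Deducted', 'missing_aria'),
--     ('Missing Alt Text Deducted', 'missing_alt'),
--     ('HTTPS Compliance Issues Deducted', 'https'),
--     ('Outdated HTML Tags Deducted', 'outdated_html'),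
--     ('Large Images Deducted', 'large_images'),
--     ('Color Contrast Issues Deducted', 'color_contrast'),
--     ('Responsive Viewport Deducted', 'responsive_viewport'),
--     ('Modern Doctype Deducted', 'modern_doctype'),
--     ('Layout Tables Deducted', 'layout_tables'),
-- ]
--
--
-- def _score(key, items):
--     """Deduction contributed by one results entry, or None if the key is irrelevant."""
--     if key == 'broken_links':
--         n = 0
--         for b in items:
--             if b[1] == '404':
--                 n += 1
--         return min(n * 5, 25)
--     wc = MAJOR.get(key)
--     if wc is not None:
--         weight, cap = wc
--         return min(len(items) * weight, cap)
--     if key in MINOR_KEYS: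
--         return 5 if items else 0
--     return None
--
--
-- def calculate_deductions(results):
--     # One pass over the INPUT items, scoring each relevant key as it is seen,
--     # then assemble the report in fixed order with 0 for keys never seen.
--     score = {}
--     for key, items in results.items():
--         s = _score(key, items)
--         if s is not None:
--             score[key] = s
--     return {label: score.get(key, 0) for label, key in ORDER}
-- ===== Notes on version B (the rewrite author's own statement) =====
-- stated objective: alternative
-- what changed: B inverts the traversal: instead of A's fourteen output-driven dict lookups, B makes one pass over the input's items scoring each relevant key into a map, then assembles the report in fixed order with default 0 for keys never seen.
import Mathlib
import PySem

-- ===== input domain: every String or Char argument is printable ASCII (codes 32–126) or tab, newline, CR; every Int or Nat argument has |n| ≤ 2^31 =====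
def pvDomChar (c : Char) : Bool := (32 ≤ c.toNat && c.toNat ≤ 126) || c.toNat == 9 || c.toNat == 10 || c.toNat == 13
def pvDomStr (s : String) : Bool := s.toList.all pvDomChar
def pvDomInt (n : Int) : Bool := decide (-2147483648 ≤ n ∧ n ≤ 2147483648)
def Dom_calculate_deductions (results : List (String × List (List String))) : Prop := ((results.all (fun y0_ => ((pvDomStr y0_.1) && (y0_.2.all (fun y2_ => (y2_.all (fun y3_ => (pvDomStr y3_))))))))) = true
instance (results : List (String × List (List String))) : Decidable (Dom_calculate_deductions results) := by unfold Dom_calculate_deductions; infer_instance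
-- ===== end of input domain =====

-- B inverts A's traversal: one pass over the INPUT's items scoring each relevant key,
-- then the report is assembled in fixed order with default 0 (objective: alternative decomposition, same cost).

-- Python truthiness of `results.get(key)` (falsy when the key is absent or its value has no items).
def pyTruthy (o : Option (List (List String))) : Bool :=
  match o with
  | some l => !l.isEmpty
  | none => false

-- ===== PORT A =====
-- A assigns each of 14 distinct fresh keys into a dict exactly once, so the dict is
-- exactly the association list of those pairs in assignment order.
def calculate_deductions (results : List (String × List (List String))) : List (String × Int) :=
  let exposed_count : Int := (PySem.Dict.getD (PySem.Dict.ofList results) "exposed_keys" []).length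
  let broken_404_count : Int :=
    ((PySem.Dict.getD (PySem.Dict.ofList results) "broken_links" []).filter
      (fun b => PySem.List.pyGet? b 1 == some "404")).length
  let accessibility_count : Int := (PySem.Dict.getD (PySem.Dict.ofList results) "accessibility" []).length
  let keyboard_count : Int := (PySem.Dict.getD (PySem.Dict.ofList results) "keyboard_accessibility" []).length
  let clickable_images_count : Int := (PySem.Dict.getD (PySem.Dict.ofList results) "clickable_images" []).length
  [("Exposed API Keys/JWTs Deducted", min (exposed_count * 17) 35),
   ("Broken Links Deducted", min (broken_404_count * 5) 25),
   ("508 Accessibility Issues Deducted", min (accessibility_count * 10) 20),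
   ("Keyboard Accessibility Issues Deducted", min (keyboard_count * 10) 20),
   ("Clickable Image Issues Deducted", min (clickable_images_count * 5) 10),
   ("Missing ARIA Labels Deducted", if pyTruthy (PySem.Dict.get? (PySem.Dict.ofList results) "missing_aria") then 5 else 0),
   ("Missing Alt Text Deducted", if pyTruthy (PySem.Dict.get? (PySem.Dict.ofList results) "missing_alt") then 5 else 0),
   ("HTTPS Compliance Issues Deducted", if pyTruthy (PySem.Dict.get? (PySem.Dict.ofList results) "https") then 5 else 0),
   ("Outdated HTML Tags Deducted", if pyTruthy (PySem.Dict.get? (PySem.Dict.ofList results) "outdated_html") then 5 else 0),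
   ("Large Images Deducted", if pyTruthy (PySem.Dict.get? (PySem.Dict.ofList results) "large_images") then 5 else 0),
   ("Color Contrast Issues Deducted", if pyTruthy (PySem.Dict.get? (PySem.Dict.ofList results) "color_contrast") then 5 else 0),
   ("Responsive Viewport Deducted", if pyTruthy (PySem.Dict.get? (PySem.Dict.ofList results) "responsive_viewport") then 5 else 0),
   ("Modern Doctype Deducted", if pyTruthy (PySem.Dict.get? (PySem.Dict.ofList results) "modern_doctype") then 5 else 0),
   ("Layout Tables Deducted", if pyTruthy (PySem.Dict.get? (PySem.Dict.ofList results) "layout_tables") then 5 else 0)]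

-- ===== PORT B =====
-- MAJOR: key -> (weight, cap) for the plain capped counts
def pvMajor : List (String × Int × Int) :=
  [("exposed_keys", 17, 35),
   ("accessibility", 10, 20),
   ("keyboard_accessibility", 10, 20),
   ("clickable_images", 5, 10)]

-- MINOR_KEYS: the flat 5-or-0 checks
def pvMinorKeys : List String :=
  ["missing_aria", "missing_alt", "https", "outdated_html", "large_images",
   "color_contrast", "responsive_viewport", "modern_doctype", "layout_tables"]

-- ORDER: (label, key) of the report, in output order
def pvOrder : List (String × String) :=
  [("Exposed API Keys/JWTs Deducted", "exposed_keys"),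
   ("Broken Links Deducted", "broken_links"),
   ("508 Accessibility Issues Deducted", "accessibility"),
   ("Keyboard Accessibility Issues Deducted", "keyboard_accessibility"),
   ("Clickable Image Issues Deducted", "clickable_images"),
   ("Missing ARIA Labels Deducted", "missing_aria"),
   ("Missing Alt Text Deducted", "missing_alt"),
   ("HTTPS Compliance Issues Deducted", "https"),
   ("Outdated HTML Tags Deducted", "outdated_html"),
   ("Large Images Deducted", "large_images"),
   ("Color Contrast Issues Deducted", "color_contrast"),
   ("Responsive Viewport Deducted", "responsive_viewport"),
   ("Modern Doctype Deducted", "modern_doctype"),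
   ("Layout Tables Deducted", "layout_tables")]

-- port of Source B's _score
def pvScore (key : String) (items : List (List String)) : Option Int :=
  if key == "broken_links" then
    some (min ((items.foldl (fun n b => if PySem.List.pyGet? b 1 == some "404" then n + 1 else n) (0 : Int)) * 5) 25)
  else
    match PySem.Dict.get? (PySem.Dict.ofList pvMajor) key with
    | some wc => some (min ((items.length : Int) * wc.1) wc.2)
    | none => if pvMinorKeys.contains key then some (if items.isEmpty then 0 else 5) else none

-- one iteration of Source B's input loop
def pvStep (acc : PySem.Dict String Int) (e : String × List (List String)) : PySem.Dict String Int :=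
  match pvScore e.1 e.2 with
  | some s => PySem.Dict.insert acc e.1 s
  | none => acc

def calculate_deductions_alt (results : List (String × List (List String))) : List (String × Int) :=
  let score := (PySem.Dict.ofList results).items.foldl pvStep PySem.Dict.empty
  pvOrder.map (fun lk => (lk.1, PySem.Dict.getD score lk.2 0))

-- ===== PRECONDITION & SPEC =====
-- Pre_ excludes inputs where some entry of the 'broken_links' value has fewer than two
-- elements: there b[1] raises IndexError in Python (in A and in B alike).
def Pre_calculate_deductions (results : List (String × List (List String))) : Prop :=
  ∀ b ∈ PySem.Dict.getD (PySem.Dict.ofList results) "broken_links" [], 2 ≤ b.length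
instance (results : List (String × List (List String))) : Decidable (Pre_calculate_deductions results) := by unfold Pre_calculate_deductions; infer_instance

def pvWitness_calculate_deductions : (List (String × List (List String))) :=
  [("broken_links", [["a", "404"], ["b", "200"]]), ("missing_aria", [["x"]])]

def Spec_calculate_deductions (results : List (String × List (List String))) (out : List (String × Int)) : Prop := out = calculate_deductions_alt results
instance (results : List (String × List (List String))) (out : List (String × Int)) : Decidable (Spec_calculate_deductions results out) := by unfold Spec_calculate_deductions; infer_instance

-- ===== CLAIM (what is proved, stated in full; the proofs are below) =====
def Claim_equal_calculate_deductions : Prop := ∀ (results : List (String × List (List String))), Dom_calculate_deductions results → Pre_calculate_deductions results → Spec_calculate_deductions results (calculate_deductions results)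

-- ===== LEMMAS AND PROOFS =====

-- the scoring loop leaves keys it never inserts untouched
lemma foldl_pvStep_get?_of_absent (L : List (String × List (List String)))
    (acc : PySem.Dict String Int) (k : String) (h : ∀ e ∈ L, e.1 ≠ k) :
    (L.foldl pvStep acc).get? k = acc.get? k := by
  induction L generalizing acc with
  | nil => rfl
  | cons e rest ih =>
    have he : e.1 ≠ k := h e (by simp)
    have hrest : ∀ e' ∈ rest, e'.1 ≠ k := fun e' m => h e' (by simp [m])
    simp only [List.foldl_cons]
    rw [ih _ hrest]
    unfold pvStep
    cases pvScore e.1 e.2 with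
    | none => rfl
    | some s => exact PySem.Dict.get?_insert_of_ne acc s (fun hk => he hk.symm)

-- first match with distinct keys
lemma find?_of_nodup_mem (L : List (String × List (List String))) (k : String)
    (v : List (List String)) (hnd : (L.map Prod.fst).Nodup) (hm : (k, v) ∈ L) :
    L.find? (fun e => e.1 == k) = some (k, v) := by
  induction L with
  | nil => simp at hm
  | cons e rest ih =>
    rcases List.mem_cons.mp hm with h | h
    · subst h; simp [List.find?]
    · have hne : e.1 ≠ k := by
        intro hk
        have : k ∈ rest.map Prod.fst := List.mem_map.mpr ⟨(k, v), h, rfl⟩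
        simp only [List.map_cons, List.nodup_cons] at hnd
        exact hnd.1 (hk ▸ this)
      have hnd' : (rest.map Prod.fst).Nodup := by
        simp only [List.map_cons, List.nodup_cons] at hnd; exact hnd.2
      have hf : (e.1 == k) = false := by simp [hne]
      simp [List.find?, hf, ih hnd' h]

-- what the scoring loop holds at k, in terms of the input dict
lemma score_spec (results : List (String × List (List String))) (k : String) :
    PySem.Dict.getD ((PySem.Dict.ofList results).items.foldl pvStep PySem.Dict.empty) k 0 =
      match PySem.Dict.get? (PySem.Dict.ofList results) k with
      | some v => (pvScore k v).getD 0
      | none => 0 := by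
  have hnd : ((PySem.Dict.ofList results).items.map Prod.fst).Nodup := by
    have := PySem.Dict.nodup_keys_ofList results
    simpa [PySem.Dict.keys] using this
  rw [PySem.Dict.getD_eq_get?_getD]
  cases hg : PySem.Dict.get? (PySem.Dict.ofList results) k with
  | none =>
    have habs : ∀ e ∈ (PySem.Dict.ofList results).items, e.1 ≠ k := by
      intro e me hk
      have hkk : k ∈ (PySem.Dict.ofList results).keys := by
        have : e.1 ∈ (PySem.Dict.ofList results).items.map Prod.fst :=
          List.mem_map.mpr ⟨e, me, rfl⟩
        simpa [PySem.Dict.keys, hk] using this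
      exact (PySem.Dict.get?_eq_none_iff_not_mem_keys _ _).mp hg hkk
    rw [foldl_pvStep_get?_of_absent _ _ _ habs]
    rfl
  | some v =>
    have hm : (k, v) ∈ (PySem.Dict.ofList results).items :=
      PySem.Dict.mem_items_of_get?_eq_some _ hg
    -- split items at the (unique) entry for k
    rcases List.find?_eq_some_iff_append.mp (find?_of_nodup_mem _ k v hnd hm) with ⟨-, L1, L2, hsplit, hL1⟩
    rw [hsplit]
    rw [List.foldl_append]
    simp only [List.foldl_cons]
    have hL2 : ∀ e ∈ L2, e.1 ≠ k := by
      intro e me hk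
      have : ((L1 ++ (k, v) :: L2).map Prod.fst).Nodup := hsplit ▸ hnd
      simp only [List.map_append, List.map_cons] at this
      have h2 := (List.nodup_append.mp this).2
      simp only [List.nodup_cons] at h2
      exact h2.1.1 (hk ▸ List.mem_map.mpr ⟨e, me, rfl⟩)
    rw [foldl_pvStep_get?_of_absent _ _ _ hL2]
    cases hs : pvScore k v with
    | some s => simp [pvStep, hs, PySem.Dict.get?_insert_self]
    | none =>
      have habs1 : ∀ e ∈ L1, e.1 ≠ k := by
        intro e me hk
        have := hL1 e me
        simp [hk] at this
      have hid : pvStep (L1.foldl pvStep PySem.Dict.empty) (k, v) = L1.foldl pvStep PySem.Dict.empty := by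
        simp [pvStep, hs]
      rw [hid, foldl_pvStep_get?_of_absent _ _ _ habs1]
      rfl

-- one report component per category, written as A computes it
lemma comp_major (results : List (String × List (List String))) (k : String) (w cap : Int)
    (hk : (k == "broken_links") = false)
    (hw : PySem.Dict.get? (PySem.Dict.ofList pvMajor) k = some (w, cap)) (hcap : 0 ≤ cap) :
    (match PySem.Dict.get? (PySem.Dict.ofList results) k with
      | some v => (pvScore k v).getD 0
      | none => 0) =
      min (((PySem.Dict.getD (PySem.Dict.ofList results) k []).length : Int) * w) cap := by
  cases hg : PySem.Dict.get? (PySem.Dict.ofList results) k with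
  | none =>
    rw [PySem.Dict.getD_eq_get?_getD, hg]
    simp [hcap]
  | some v =>
    rw [PySem.Dict.getD_eq_get?_getD, hg]
    simp [pvScore, hk, hw]

lemma comp_minor (results : List (String × List (List String))) (k : String)
    (hk : (k == "broken_links") = false)
    (hM : PySem.Dict.get? (PySem.Dict.ofList pvMajor) k = none)
    (hm : pvMinorKeys.contains k = true) :
    (match PySem.Dict.get? (PySem.Dict.ofList results) k with
      | some v => (pvScore k v).getD 0
      | none => 0) =
      (if pyTruthy (PySem.Dict.get? (PySem.Dict.ofList results) k) then (5 : Int) else 0) := by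
  cases hg : PySem.Dict.get? (PySem.Dict.ofList results) k with
  | none => simp [pyTruthy]
  | some v =>
    simp only [pvScore, hk, hM, hm, pyTruthy]
    by_cases hv : v.isEmpty = true <;> simp [hv]

lemma comp_broken (results : List (String × List (List String))) :
    (match PySem.Dict.get? (PySem.Dict.ofList results) "broken_links" with
      | some v => (pvScore "broken_links" v).getD 0
      | none => 0) =
      min ((((PySem.Dict.getD (PySem.Dict.ofList results) "broken_links" []).filter
        (fun b => PySem.List.pyGet? b 1 == some "404")).length : Int) * 5) 25 := by
  cases hg : PySem.Dict.get? (PySem.Dict.ofList results) "broken_links" with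
  | none =>
    rw [PySem.Dict.getD_eq_get?_getD, hg]
    simp
  | some v =>
    rw [PySem.Dict.getD_eq_get?_getD, hg]
    simp only [pvScore, Option.getD_some, beq_self_eq_true, if_true]
    rw [PySem.List.foldl_count_if (fun b => PySem.List.pyGet? b 1 == some "404") v 0]
    rw [List.countP_eq_length_filter]
    simp

-- ===== VERDICT (by name: the statement is the Claim_ definition above) =====
theorem calculate_deductions_spec : Claim_equal_calculate_deductions := by
  intro results _ _
  unfold Spec_calculate_deductions calculate_deductions calculate_deductions_alt
  simp only [pvOrder, List.map_cons, List.map_nil, score_spec, comp_broken results,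
    comp_major results "exposed_keys" 17 35 rfl rfl (by norm_num),
    comp_major results "accessibility" 10 20 rfl rfl (by norm_num),
    comp_major results "keyboard_accessibility" 10 20 rfl rfl (by norm_num),
    comp_major results "clickable_images" 5 10 rfl rfl (by norm_num),
    comp_minor results "missing_aria" rfl rfl rfl,
    comp_minor results "missing_alt" rfl rfl rfl,
    comp_minor results "https" rfl rfl rfl,
    comp_minor results "outdated_html" rfl rfl rfl,
    comp_minor results "large_images" rfl rfl rfl,
    comp_minor results "color_contrast" rfl rfl rfl,
    comp_minor results "responsive_viewport" rfl rfl rfl,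
    comp_minor results "modern_doctype" rfl rfl rfl,
    comp_minor results "layout_tables" rfl rfl rfl]
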